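-- pv_equiv track=rewrite | github.com/kyss0311/crawler_requests_ajax_cookies | cookie_ptt_beauty/b.py | dos
-- ===== SOURCE A (Python) =====
-- def dos(str):
--     group = []
--     part = []
--     for i in str:
--         if i == ' ' or i == ',':
--             group.append(part)
--             part = []
--             continue
--         part.append(i)
--     group.append(part)
--     return group
-- ===== SOURCE B (Python) =====
-- def dos(str):
--     return [list(p) for p in str.replace(',', ' ').split(' ')]
-- ===== Notes on version B (the rewrite author's own statement) =====
-- stated objective: idiomatic
-- what changed: Replaces A's character-by-character accumulator-and-flush loop with a one-liner that normalises commas to spaces, splits on spaces (keeping empty pieces), and maps each piece to its list of characters.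
import Mathlib
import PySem

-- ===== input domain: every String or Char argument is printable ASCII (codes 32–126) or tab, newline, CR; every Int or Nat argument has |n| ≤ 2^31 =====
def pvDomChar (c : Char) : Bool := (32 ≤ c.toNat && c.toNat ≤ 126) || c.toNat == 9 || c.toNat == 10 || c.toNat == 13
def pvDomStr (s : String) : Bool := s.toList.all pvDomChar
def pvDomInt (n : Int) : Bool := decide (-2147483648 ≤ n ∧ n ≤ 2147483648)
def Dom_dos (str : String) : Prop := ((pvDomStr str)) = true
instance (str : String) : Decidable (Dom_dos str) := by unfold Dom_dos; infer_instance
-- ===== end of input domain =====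

-- B replaces A's per-character accumulator-and-flush loop with an idiomatic
-- normalise-commas / split-on-space / map-to-char-list one-liner (same cost).


-- ===== PORT A =====
-- the for-loop with its (group, part) state, flushed once more after the loop
def dosGo : List Char → List (List String) → List String → List (List String)
  | [], group, part => group ++ [part]
  | c :: rest, group, part =>
      if c = ' ' ∨ c = ',' then dosGo rest (group ++ [part]) []
      else dosGo rest group (part ++ [String.ofList [c]])

def dos (str : String) : List (List String) := dosGo str.toList [] []

-- ===== PORT B =====
-- [list(p) for p in str.replace(',', ' ').split(' ')]
def dos_alt (str : String) : List (List String) :=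
  ((PySem.Str.split? (PySem.Str.replace str "," " ") " ").getD []).map
    (fun p => p.toList.map (fun c => String.ofList [c]))

-- ===== PRECONDITION & SPEC =====
def Spec_dos (str : String) (out : List (List String)) : Prop := out = dos_alt str
instance (str : String) (out : List (List String)) : Decidable (Spec_dos str out) := by unfold Spec_dos; infer_instance

-- ===== CLAIM (what is proved, stated in full; the proofs are below) =====
def Claim_equal_dos : Prop := ∀ (str : String), Dom_dos str → Spec_dos str (dos str)

-- ===== LEMMAS AND PROOFS =====

-- the common reference shape: pieces of the input between spaces/commas
def splitC : List Char → List (List Char)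
  | [] => [[]]
  | c :: t => if c = ' ' ∨ c = ',' then [] :: splitC t else (splitC t).modifyHead (c :: ·)

def toS (cs : List Char) : List String := cs.map (fun c => String.ofList [c])

theorem splitC_ne_nil (l : List Char) : splitC l ≠ [] := by
  cases l with
  | nil => simp [splitC]
  | cons c t =>
    simp only [splitC]
    split
    · simp
    · cases h : splitC t with
      | nil => exact absurd h (splitC_ne_nil t)
      | cons a b => simp

theorem modifyHead_modifyHead {α : Type} (f g : α → α) (xs : List α) :
    (xs.modifyHead g).modifyHead f = xs.modifyHead (f ∘ g) := by
  cases xs <;> simp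

theorem modifyHead_id' {α : Type} (xs : List α) :
    xs.modifyHead (fun x => x) = xs := by
  cases xs <;> simp

theorem modifyHead_ext {α : Type} {f g : α → α} (h : ∀ a, f a = g a) (xs : List α) :
    xs.modifyHead f = xs.modifyHead g := by
  cases xs <;> simp [h]

theorem map_modifyHead_toS (c : Char) (xs : List (List Char)) (h : xs ≠ []) :
    (xs.modifyHead (c :: ·)).map toS = (xs.map toS).modifyHead (String.ofList [c] :: ·) := by
  cases xs with
  | nil => exact absurd rfl h
  | cons a b => simp [toS]

-- A's loop computes splitC with the pending prefix p glued onto the head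
theorem dosGo_eq (l : List Char) : ∀ (g : List (List String)) (p : List String),
    dosGo l g p = g ++ ((splitC l).map toS).modifyHead (p ++ ·) := by
  induction l with
  | nil => intro g p; simp [dosGo, splitC, toS]
  | cons c t ih =>
    intro g p
    simp only [dosGo, splitC]
    split
    · rw [ih]
      cases h : (splitC t).map toS with
      | nil => exact absurd (List.map_eq_nil_iff.mp h) (splitC_ne_nil t)
      | cons a b => simp [toS, h]
    · rw [ih, map_modifyHead_toS c _ (splitC_ne_nil t), modifyHead_modifyHead]
      exact congrArg (g ++ ·) (modifyHead_ext (fun a => by simp [Function.comp]) _)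

-- what a character becomes under str.replace(',', ' ')
def repl (c : Char) : Char := if c = ',' then ' ' else c

theorem replace_go_comma (fuel : Nat) : ∀ (l acc : List Char), l.length ≤ fuel →
    PySem.Chars.replace.go [','] [' '] fuel l acc = acc.reverse ++ l.map repl := by
  induction fuel with
  | zero =>
    intro l acc h
    have : l = [] := List.eq_nil_of_length_eq_zero (Nat.le_zero.mp h)
    subst this; simp [PySem.Chars.replace.go]
  | succ n ih =>
    intro l acc h
    cases l with
    | nil => simp [PySem.Chars.replace.go]
    | cons c t =>
      simp only [PySem.Chars.replace.go]
      by_cases hc : c = ','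
      · subst hc
        rw [if_pos (by simp [List.isPrefixOf])]
        rw [show List.drop [','].length (',' :: t) = t from rfl]
        rw [ih t _ (by simpa using h)]
        simp [repl]
      · rw [if_neg (by simp [List.isPrefixOf]; exact fun h => hc h.symm)]
        rw [ih t _ (by simpa using h)]
        simp [repl, hc]

theorem replace_comma (l : List Char) :
    PySem.Chars.replace l [','] [' '] = l.map repl := by
  simp only [PySem.Chars.replace]
  rw [if_neg (by simp)]
  exact replace_go_comma l.length l [] (le_refl _)

-- split on a single space, one piece at a time
def splitW : List Char → List (List Char)
  | [] => [[]]
  | c :: t => if c = ' ' then [] :: splitW t else (splitW t).modifyHead (c :: ·)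

theorem splitW_ne_nil (l : List Char) : splitW l ≠ [] := by
  cases l with
  | nil => simp [splitW]
  | cons c t =>
    simp only [splitW]
    split
    · simp
    · cases h : splitW t with
      | nil => exact absurd h (splitW_ne_nil t)
      | cons a b => simp

theorem splitOn_go_space (fuel : Nat) : ∀ (l cur : List Char) (accs : List (List Char)),
    l.length < fuel →
    PySem.Chars.splitOn.go [' '] fuel l cur accs.reverse
      = accs ++ (splitW l).modifyHead (cur.reverse ++ ·) := by
  induction fuel with
  | zero => intro _ _ _ h; omega
  | succ n ih =>
    intro l cur accs h
    cases l with
    | nil => simp [PySem.Chars.splitOn.go, splitW]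
    | cons c t =>
      simp only [PySem.Chars.splitOn.go]
      by_cases hc : c = ' '
      · subst hc
        rw [if_pos (by simp [List.isPrefixOf])]
        rw [show List.drop [' '].length (' ' :: t) = t from rfl]
        rw [show (cur.reverse :: accs.reverse : List (List Char)) = (accs ++ [cur.reverse]).reverse by simp]
        rw [ih t [] (accs ++ [cur.reverse]) (by simpa using h)]
        simp [splitW, modifyHead_id']
      · rw [if_neg (by simp [List.isPrefixOf]; exact fun h => hc h.symm)]
        rw [ih t (c :: cur) accs (by simpa using h)]
        rw [splitW]
        rw [if_neg hc, modifyHead_modifyHead]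
        exact congrArg (accs ++ ·) (modifyHead_ext (fun a => by simp [Function.comp]) _)

theorem splitOn_space (l : List Char) :
    PySem.Chars.splitOn l [' '] = splitW l := by
  simp only [PySem.Chars.splitOn]
  have h0 := splitOn_go_space (l.length + 1) l [] ([] : List (List Char)) (by omega)
  simp only [List.reverse_nil, List.nil_append] at h0
  rw [h0, modifyHead_id']

theorem splitW_map_repl (l : List Char) : splitW (l.map repl) = splitC l := by
  induction l with
  | nil => rfl
  | cons c t ih =>
    simp only [List.map_cons, splitW, splitC, repl]
    by_cases hc : c = ','
    · subst hc; simp [ih]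
    · by_cases hs : c = ' '
      · subst hs; simp [ih]
      · simp [hc, hs, ih]

-- ===== VERDICT (by name: the statement is the Claim_ definition above) =====
theorem dos_spec : Claim_equal_dos := by
  intro str _
  show dos str = dos_alt str
  -- B side: reduce to chars
  have hsplit : Option.map (fun x => List.map String.toList x)
      (PySem.Str.split? (PySem.Str.replace str "," " ") " ")
      = PySem.Chars.split? (PySem.Str.replace str "," " ").toList [' '] := by
    exact PySem.Str.split?_map (PySem.Str.replace str "," " ") " "
  rw [PySem.Str.toList_replace] at hsplit
  have hrepl : PySem.Chars.replace str.toList (",".toList) (" ".toList) = str.toList.map repl := by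
    exact replace_comma str.toList
  rw [hrepl] at hsplit
  rw [show PySem.Chars.split? (str.toList.map repl) [' ']
        = some (PySem.Chars.splitOn (str.toList.map repl) [' ']) by simp [PySem.Chars.split?]] at hsplit
  obtain ⟨ps, hps, hmap⟩ : ∃ ps, PySem.Str.split? (PySem.Str.replace str "," " ") " " = some ps ∧
      ps.map String.toList = PySem.Chars.splitOn (str.toList.map repl) [' '] := by
    cases hsome : PySem.Str.split? (PySem.Str.replace str "," " ") " " with
    | none => rw [hsome] at hsplit; simp at hsplit
    | some ps => rw [hsome] at hsplit; exact ⟨ps, rfl, by simpa using hsplit⟩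
  unfold dos_alt
  rw [hps]
  have : (ps.map (fun p => p.toList.map (fun c => String.ofList [c])))
      = (ps.map String.toList).map toS := by
    simp [toS, Function.comp]
  simp only [Option.getD_some]
  calc dos str = ((splitC str.toList).map toS).modifyHead (([] : List String) ++ ·) := by
        simpa using dosGo_eq str.toList [] []
    _ = (splitC str.toList).map toS := by
        cases h : (splitC str.toList).map toS with
        | nil => rfl
        | cons a b => simp
    _ = ps.map (fun p => p.toList.map (fun c => String.ofList [c])) := by
        rw [this, hmap, splitOn_space, splitW_map_repl]
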